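-- pv_equiv track=rewrite | github.com/conda/conda-lock | conda_lock/common.py | prefix_union
-- ===== SOURCE A (Python) =====
-- from typing import (
--     Any,
--     Dict,
--     Iterable,
--     Iterator,
--     List,
--     Mapping,
--     Sequence,
--     TypeVar,
--     Union,
-- )
--
-- def prefix_union(collections: Iterable[Sequence]) -> List:
--     """Generates the union of sequence ensuring that they have a common prefix.
--
--     >>> prefix_union([[1], [1, 2], [1, 2, 3], [1, 2], [1]])
--     [1, 2, 3]
--
--     >>> prefix_union([[1], [1, 2], [1, 4]])
--     Traceback (most recent call last)
--         ...
--     ValueError: [1, 4] is not an ordered subset of [1, 2]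
--     """
--     result: List = []
--     for seq in collections:
--         for i, item in enumerate(seq):
--             if i >= len(result):
--                 result.append(item)
--             elif result[i] != item:
--                 raise ValueError(f"{seq} is not an ordered subset of {result}")
--     return result
-- ===== SOURCE B (Python) =====
-- def prefix_union(collections):
--     """Union of sequences sharing a common prefix: per sequence, one-shot
--     prefix comparison against the current result, then tail extension."""
--     result = []
--     for seq in collections:
--         n = len(result)
--         if list(seq[:n]) != result[:len(seq)]:
--             raise ValueError(f"{seq} is not an ordered subset of {result}")
--         if len(seq) > n:
--             result.extend(seq[n:])
--     return result
-- ===== Notes on version B (the rewrite author's own statement) =====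
-- stated objective: simpler
-- what changed: Replaces A's interleaved per-element enumerate loop (check-or-append at each index) with a per-sequence one-shot prefix comparison followed by a single tail extension.
import Mathlib
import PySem

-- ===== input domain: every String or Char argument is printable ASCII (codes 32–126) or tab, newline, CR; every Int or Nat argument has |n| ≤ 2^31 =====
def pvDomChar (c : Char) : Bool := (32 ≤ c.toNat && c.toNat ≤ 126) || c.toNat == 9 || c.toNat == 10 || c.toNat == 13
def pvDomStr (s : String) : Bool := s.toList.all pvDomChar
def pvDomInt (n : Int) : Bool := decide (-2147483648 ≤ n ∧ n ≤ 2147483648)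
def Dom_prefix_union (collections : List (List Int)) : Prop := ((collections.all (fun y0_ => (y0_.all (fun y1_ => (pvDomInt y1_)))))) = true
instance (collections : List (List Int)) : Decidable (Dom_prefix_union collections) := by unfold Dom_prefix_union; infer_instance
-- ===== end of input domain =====

-- B is a per-sequence one-shot prefix comparison + tail extension instead of A's
-- per-element check-or-append index loop; same return value on every non-raising input.

-- ===== PORT A =====
-- inner 'for i, item in enumerate(seq)' loop; the ValueError branch (excluded by Pre_)
-- returns the current result so the function stays total.
def pvInnerA (seq : List Int) (i : Nat) (result : List Int) : List Int :=
  match seq with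
  | [] => result
  | item :: rest =>
      if result.length ≤ i then
        pvInnerA rest (i + 1) (result ++ [item])
      else if result.getD i 0 ≠ item then
        result            -- raise ValueError: excluded by Pre_prefix_union
      else
        pvInnerA rest (i + 1) result

def prefix_union (collections : List (List Int)) : List Int :=
  collections.foldl (fun result seq => pvInnerA seq 0 result) []

-- ===== PORT B =====
def prefix_union_alt (collections : List (List Int)) : List Int :=
  collections.foldl (fun result seq =>
    let n := result.length
    if seq.take n ≠ result.take seq.length then
      result            -- raise ValueError: excluded by Pre_prefix_union
    else if n < seq.length then
      result ++ seq.drop n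
    else
      result) []

-- ===== PRECONDITION & SPEC =====
-- Pre_ excludes exactly the inputs on which the Python A raises ValueError
-- (two sequences that are not prefix-comparable); B raises there too.
def Pre_prefix_union (collections : List (List Int)) : Prop :=
  ∀ a ∈ collections, ∀ b ∈ collections, a <+: b ∨ b <+: a
instance (collections : List (List Int)) : Decidable (Pre_prefix_union collections) := by
  unfold Pre_prefix_union; infer_instance

def pvWitness_prefix_union : List (List Int) := [[1], [1, 2], [1, 2, 3], [1, 2], [1]]

def Spec_prefix_union (collections : List (List Int)) (out : List Int) : Prop := out = prefix_union_alt collections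
instance (collections : List (List Int)) (out : List Int) : Decidable (Spec_prefix_union collections out) := by unfold Spec_prefix_union; infer_instance

-- ===== CLAIM (what is proved, stated in full; the proofs are below) =====
def Claim_equal_prefix_union : Prop := ∀ (collections : List (List Int)), Dom_prefix_union collections → Pre_prefix_union collections → Spec_prefix_union collections (prefix_union collections)

-- ===== LEMMAS AND PROOFS =====

-- Characterisation of A's inner loop: valid for EVERY input (raise or not), so the
-- fold steps of the two ports coincide pointwise and Pre_ is not even needed here.
lemma pvInnerA_eq (seq : List Int) : ∀ (i : Nat) (result : List Int), i ≤ result.length →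
    pvInnerA seq i result =
      if seq.take (result.length - i) = (result.drop i).take seq.length then
        result ++ seq.drop (result.length - i)
      else result := by
  induction seq with
  | nil =>
      intro i result _
      simp [pvInnerA]
  | cons item rest ih =>
      intro i result hi
      by_cases hlen : result.length ≤ i
      · -- i = result.length: pure append phase
        have hEq : i = result.length := le_antisymm hi hlen
        rw [pvInnerA]
        simp only [hlen, if_pos]
        have h1 : i + 1 ≤ (result ++ [item]).length := by simp [hEq]
        rw [ih (i + 1) (result ++ [item]) h1]
        have h2 : (result ++ [item]).length - (i + 1) = 0 := by simp [hEq]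
        have h3 : result.length - i = 0 := by omega
        simp [hEq]
      · -- i < result.length: compare result[i] with item
        rw [not_le] at hlen
        rw [pvInnerA]
        simp only [if_neg (not_le.mpr hlen)]
        have hdrop : result.drop i = result[i] :: result.drop (i + 1) :=
          List.drop_eq_getElem_cons hlen
        have hget : result.getD i 0 = result[i] := List.getD_eq_getElem _ _ hlen
        have hsub : result.length - i = (result.length - (i + 1)) + 1 := by omega
        by_cases hne : result[i] = item
        · subst hne
          simp only [hget, ne_eq, not_true_eq_false, if_false]
          rw [ih (i + 1) result (by omega), hsub, hdrop]
          simp only [List.length_cons, List.take_succ_cons, List.cons.injEq, true_and, List.drop_succ_cons]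
        · simp only [hget, ne_eq, hne, not_false_eq_true, if_true]
          rw [hdrop, hsub]
          simp only [List.length_cons, List.take_succ_cons]
          rw [if_neg (fun h => hne ((List.cons.inj h).1).symm)]

-- the two fold steps are equal on every (result, seq)
lemma pvStep_eq (result seq : List Int) :
    pvInnerA seq 0 result =
      (if seq.take result.length ≠ result.take seq.length then result
       else if result.length < seq.length then result ++ seq.drop result.length
       else result) := by
  rw [pvInnerA_eq seq 0 result (Nat.zero_le _)]
  simp only [Nat.sub_zero, List.drop_zero, ne_eq, ite_not]
  by_cases h : seq.take result.length = result.take seq.length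
  · simp only [h, if_pos]
    by_cases hl : result.length < seq.length
    · simp [hl]
    · simp [hl, List.drop_eq_nil_of_le (le_of_not_gt hl)]
  · simp [h]

theorem prefix_union_eq_alt (collections : List (List Int)) :
    prefix_union collections = prefix_union_alt collections := by
  unfold prefix_union prefix_union_alt
  congr 1
  funext result seq
  exact pvStep_eq result seq

-- ===== VERDICT (by name: the statement is the Claim_ definition above) =====
theorem prefix_union_spec : Claim_equal_prefix_union := by
  intro collections _ _
  unfold Spec_prefix_union
  exact prefix_union_eq_alt collections
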